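-- pv_equiv track=rewrite | github.com/YingZhou001/Immuannot-bt | script/fmt-extract-VDJ-region.py | read_seq
-- ===== SOURCE A (Python) =====
-- def read_seq(buf: str) :
--     llst = buf.split('\n')
--     tag = False
--     seq = []
--     for line in llst :
--         if tag :
--             seq.append("".join(filter(lambda x: x.isalpha(), line)))
--         if line[0:2] == 'SQ' : tag = True
--     return("".join(seq))
-- ===== SOURCE B (Python) =====
-- def read_seq(buf: str):
--     # substring search: a line starts with 'SQ' iff '\nSQ' occurs in '\n' + buf
--     t = '\n' + buf
--     p = t.find('\nSQ')
--     if p == -1: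
--         return ''
--     q = t.find('\n', p + 1)
--     if q == -1:
--         return ''
--     return ''.join(filter(str.isalpha, t[q + 1:]))
-- ===== Notes on version B (the rewrite author's own statement) =====
-- stated objective: alternative
-- what changed: B never splits the text into lines: it locates the first SQ-tagged line by searching the raw string for a newline immediately followed by the tag (a newline is prepended so a tag on the first line is the same case), then searches for the next newline and alpha-filters the raw suffix in one pass, instead of A's split-into-lines loop carrying a flag and accumulating per-line filtered pieces.
import Mathlib
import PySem

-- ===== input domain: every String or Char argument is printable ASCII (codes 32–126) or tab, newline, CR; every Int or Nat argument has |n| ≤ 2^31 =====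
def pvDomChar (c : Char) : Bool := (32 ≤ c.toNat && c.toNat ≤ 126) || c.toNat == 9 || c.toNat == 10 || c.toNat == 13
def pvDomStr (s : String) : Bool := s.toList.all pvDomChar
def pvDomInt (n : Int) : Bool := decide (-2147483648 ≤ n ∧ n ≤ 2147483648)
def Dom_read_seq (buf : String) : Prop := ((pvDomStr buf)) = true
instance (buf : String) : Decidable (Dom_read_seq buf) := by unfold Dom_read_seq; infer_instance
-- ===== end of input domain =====

-- B replaces A's split-into-lines flag loop by raw substring search: find a newline followed by the SQ tag in the newline-prepended text, then the next newline, and alpha-filter the suffix (objective: alternative).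


-- ===== PORT A =====
-- A's 'for line in llst' loop with its (tag, seq) state, as structural recursion
def readSeqLoop : List (List Char) → Bool → List (List Char) → List (List Char)
  | [], _, seq => seq
  | line :: rest, tag, seq =>
    let seq' := if tag then seq ++ [line.filter PySem.Chars.isalpha] else seq
    let tag' := if PySem.Chars.slice line (some 0) (some 2) = ['S', 'Q'] then true else tag
    readSeqLoop rest tag' seq'

def read_seq (buf : String) : String :=
  let llst := PySem.Chars.splitOn buf.toList ['\n']
  String.mk (PySem.Chars.join [] (readSeqLoop llst false []))

-- ===== PORT B =====
-- Source B: t = '\n' + buf; p = t.find('\nSQ'); q = t.find('\n', p + 1); filter alpha over t[q+1:]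
def read_seq_alt (buf : String) : String :=
  let t := '\n' :: buf.toList
  let p := PySem.Chars.find t ['\n', 'S', 'Q']
  if p = -1 then ""
  else
    let q := PySem.Chars.findFrom t ['\n'] (p + 1) none
    if q = -1 then ""
    else String.mk ((PySem.Chars.slice t (some (q + 1)) none).filter PySem.Chars.isalpha)

-- ===== PRECONDITION & SPEC =====
def Spec_read_seq (buf : String) (out : String) : Prop := out = read_seq_alt buf
instance (buf : String) (out : String) : Decidable (Spec_read_seq buf out) := by unfold Spec_read_seq; infer_instance

-- ===== CLAIM =====
def Claim_equal_read_seq : Prop := ∀ (buf : String), Dom_read_seq buf → Spec_read_seq buf (read_seq buf)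

-- ===== LEMMAS AND PROOFS =====

-- A's slice line[0:2] and line[:2] are the same prefix
theorem slice02_eq (line : List Char) :
    PySem.Chars.slice line (some 0) (some 2) = PySem.Chars.slice line none (some 2) := by
  simp [pysem]

-- once the flag is set, every remaining line is appended filtered
theorem readSeqLoop_true (l : List (List Char)) (seq : List (List Char)) :
    readSeqLoop l true seq = seq ++ l.map (·.filter PySem.Chars.isalpha) := by
  induction l generalizing seq with
  | nil => simp [readSeqLoop]
  | cons x xs ih => simp [readSeqLoop, ih]

-- before the flag is set, the result is the filtered tail after the first SQ line
theorem readSeqLoop_false (l : List (List Char)) (seq : List (List Char)) :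
    readSeqLoop l false seq =
      seq ++ (match l.findIdx? (fun line => PySem.Chars.slice line none (some 2) = ['S', 'Q']) with
              | none => []
              | some i => (l.drop (i + 1)).map (·.filter PySem.Chars.isalpha)) := by
  induction l generalizing seq with
  | nil => simp [List.findIdx?_nil, readSeqLoop]
  | cons x xs ih =>
    by_cases h : PySem.Chars.slice x none (some 2) = ['S', 'Q']
    · simp only [PySem.Chars.slice] at h
      simp [readSeqLoop, slice02_eq, h, readSeqLoop_true, List.findIdx?_cons, PySem.Chars.slice]
    · simp only [readSeqLoop, slice02_eq, h, if_false, ih, List.findIdx?_cons]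
      simp only [h, decide_false]
      cases hf : xs.findIdx? (fun line => decide (PySem.Chars.slice line none (some 2) = ['S', 'Q'])) <;>
        simp [hf]

-- filtering the '\n'-joined tail equals joining the per-line filtered pieces ('\n' is not alpha)
theorem filter_join_newline (parts : List (List Char)) :
    (PySem.Chars.join ['\n'] parts).filter PySem.Chars.isalpha =
      PySem.Chars.join [] (parts.map (·.filter PySem.Chars.isalpha)) := by
  induction parts with
  | nil => simp [PySem.Chars.join, List.intercalate]
  | cons x xs ih =>
    cases xs with
    | nil => simp [PySem.Chars.join, List.intercalate]
    | cons y ys =>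
      simp only [PySem.Chars.join, List.intercalate, List.intersperse, List.map_cons] at ih ⊢
      simp [List.filter_append, ih, show PySem.Chars.isalpha '\n' = false from by decide]

-- a structural model of buf.split('\n')
def mySplit : List Char → List (List Char)
  | [] => [[]]
  | c :: rest => if c = '\n' then [] :: mySplit rest else (mySplit rest).modifyHead (c :: ·)

theorem mySplit_ne_nil (l : List Char) : mySplit l ≠ [] := by
  induction l with
  | nil => simp [mySplit]
  | cons c rest ih =>
    simp only [mySplit]
    split_ifs
    · simp
    · intro h
      have h2 := congrArg List.length h
      simp at h2
      exact ih h2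

theorem splitOn_go_eq (l : List Char) :
    ∀ (fuel : Nat) (cur : List Char) (acc : List (List Char)), l.length < fuel →
    PySem.Chars.splitOn.go ['\n'] fuel l cur acc
      = acc.reverse ++ (mySplit l).modifyHead (cur.reverse ++ ·) := by
  induction l with
  | nil =>
    intro fuel cur acc h
    obtain ⟨f, rfl⟩ : ∃ f, fuel = f + 1 := ⟨fuel - 1, by omega⟩
    simp [PySem.Chars.splitOn.go, mySplit]
  | cons c rest ih =>
    intro fuel cur acc h
    obtain ⟨f, rfl⟩ : ∃ f, fuel = f + 1 := ⟨fuel - 1, by omega⟩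
    simp only [List.length_cons] at h
    by_cases hc : c = '\n'
    · subst hc
      simp only [PySem.Chars.splitOn.go, List.isPrefixOf, beq_self_eq_true, Bool.true_and,
        List.isPrefixOf_nil_left, if_true]
      have hdrop : List.drop (['\n'] : List Char).length ('\n' :: rest) = rest := rfl
      rw [hdrop, ih f [] (cur.reverse :: acc) (by omega)]
      obtain ⟨q, qs, hqs⟩ := List.exists_cons_of_ne_nil (mySplit_ne_nil rest)
      simp [mySplit, hqs]
    · have hpre : List.isPrefixOf ['\n'] (c :: rest) = false := by
        simp [List.isPrefixOf]
        exact fun h' => absurd h'.symm hc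
      simp only [PySem.Chars.splitOn.go, hpre, Bool.false_eq_true, not_false_iff, if_false]
      rw [ih f (c :: cur) acc (by omega)]
      obtain ⟨p, ps, hps⟩ := List.exists_cons_of_ne_nil (mySplit_ne_nil rest)
      simp [mySplit, hc, hps]

theorem splitOn_eq_mySplit (s : List Char) :
    PySem.Chars.splitOn s ['\n'] = mySplit s := by
  unfold PySem.Chars.splitOn
  rw [splitOn_go_eq s (s.length + 1) [] [] (by omega)]
  obtain ⟨p, ps, hps⟩ := List.exists_cons_of_ne_nil (mySplit_ne_nil s)
  simp [hps]

theorem mySplit_no_nl (l : List Char) (h : '\n' ∉ l) : mySplit l = [l] := by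
  induction l with
  | nil => simp [mySplit]
  | cons c rest ih =>
    have hc : c ≠ '\n' := fun hc => h (hc ▸ List.mem_cons_self)
    simp [mySplit, hc, ih (fun hm => h (List.mem_cons_of_mem _ hm))]

theorem mySplit_append (a b : List Char) (h : '\n' ∉ a) :
    mySplit (a ++ '\n' :: b) = a :: mySplit b := by
  induction a with
  | nil => simp [mySplit]
  | cons c rest ih =>
    have hc : c ≠ '\n' := fun hc => h (hc ▸ List.mem_cons_self)
    simp [mySplit, hc, ih (fun hm => h (List.mem_cons_of_mem _ hm))]

theorem join_mySplit (b : List Char) :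
    PySem.Chars.join ['\n'] (mySplit b) = b := by
  induction b with
  | nil => simp [mySplit, PySem.Chars.join, List.intercalate]
  | cons c rest ih =>
    by_cases hc : c = '\n'
    · subst hc
      obtain ⟨p, ps, hps⟩ := List.exists_cons_of_ne_nil (mySplit_ne_nil rest)
      rw [hps] at ih
      simp only [mySplit, if_pos rfl, hps]
      simpa [PySem.Chars.join, List.intercalate, List.intersperse] using ih
    · obtain ⟨p, ps, hps⟩ := List.exists_cons_of_ne_nil (mySplit_ne_nil rest)
      rw [hps] at ih
      simp only [mySplit, if_neg hc, hps, List.modifyHead]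
      cases ps with
      | nil => simpa [PySem.Chars.join, List.intercalate, List.intersperse] using congrArg (c :: ·) ih
      | cons y ys =>
        simp only [PySem.Chars.join, List.intercalate, List.intersperse] at ih ⊢
        simp only [List.flatten] at ih ⊢
        rw [← ih]
        simp

-- A's result, expressed on the mySplit line structure
def Acore (s : List Char) : List Char :=
  match (mySplit s).findIdx? (fun line => PySem.Chars.slice line none (some 2) = ['S', 'Q']) with
  | none => []
  | some i => (PySem.Chars.join ['\n'] ((mySplit s).drop (i + 1))).filter PySem.Chars.isalpha

-- B's result as a list computation
def Bcore (t : List Char) : List Char :=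
  if PySem.Chars.find t ['\n', 'S', 'Q'] = -1 then []
  else if PySem.Chars.findFrom t ['\n'] (PySem.Chars.find t ['\n', 'S', 'Q'] + 1) none = -1 then []
  else (PySem.Chars.slice t
      (some (PySem.Chars.findFrom t ['\n'] (PySem.Chars.find t ['\n', 'S', 'Q'] + 1) none + 1))
      none).filter PySem.Chars.isalpha

theorem read_seq_eq (buf : String) : read_seq buf = String.mk (Acore buf.toList) := by
  unfold read_seq Acore
  dsimp only
  rw [splitOn_eq_mySplit, readSeqLoop_false]
  cases hf : (mySplit buf.toList).findIdx?
      (fun line => decide (PySem.Chars.slice line none (some 2) = ['S', 'Q'])) with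
  | none => simp [hf]
  | some i => simp [hf, filter_join_newline]

theorem read_seq_alt_eq (buf : String) : read_seq_alt buf = String.mk (Bcore ('\n' :: buf.toList)) := by
  unfold read_seq_alt Bcore
  dsimp only
  split_ifs <;> rfl

-- find s sub = k when sub occurs at k and nowhere earlier
theorem find_eq_of (s sub : List Char) (k : Nat) (hk : sub <+: s.drop k)
    (hmin : ∀ i < k, ¬ sub <+: s.drop i) : PySem.Chars.find s sub = (k : Int) := by
  have hinf : sub <:+: s := by
    obtain ⟨u, hu⟩ := hk
    exact ⟨s.take k, u, by rw [List.append_assoc, hu, List.take_append_drop]⟩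
  have hne : PySem.Chars.find s sub ≠ -1 := (PySem.Chars.find_ne_neg_one_iff s sub).mpr hinf
  have h0 : 0 ≤ PySem.Chars.find s sub := by
    have := PySem.Chars.neg_one_le_find s sub
    omega
  obtain ⟨hpre, hmin'⟩ := PySem.Chars.find_spec h0
  have : (PySem.Chars.find s sub).toNat = k := by
    rcases lt_trichotomy (PySem.Chars.find s sub).toNat k with h | h | h
    · exact absurd hpre (hmin _ h)
    · exact h
    · exact absurd hk (hmin' k h)
  omega

theorem find_eq_neg_one_of (s sub : List Char) (h : ∀ j, ¬ sub <+: s.drop j) :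
    PySem.Chars.find s sub = -1 := by
  rw [PySem.Chars.find_eq_neg_one_iff]
  intro hinf
  obtain ⟨j, hj⟩ := (PySem.Chars.exists_prefix_drop_iff_isIn sub s).mpr
    ((PySem.Chars.isIn_iff_infix sub s).mpr hinf)
  exact h j hj

-- generic drop over an append
theorem drop_shift (x y : List Char) (m : Nat) : (x ++ y).drop (x.length + m) = y.drop m := by
  induction x with
  | nil => simp
  | cons c r ih => simpa [Nat.succ_add] using ih

-- Python slice l[k:] for a nonnegative k
theorem slice_from_nat (l : List Char) (k : Nat) :
    PySem.Chars.slice l (some ((k : Int))) none = l.drop k := by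
  simp [pysem]

theorem not_prefix_drop_of_find_neg (s sub : List Char) (h : PySem.Chars.find s sub = -1) :
    ∀ j, ¬ sub <+: s.drop j := by
  intro j hj
  have hinf : sub <:+: s := by
    obtain ⟨u, hu⟩ := hj
    exact ⟨s.take j, u, by rw [List.append_assoc, hu, List.take_append_drop]⟩
  exact (PySem.Chars.find_ne_neg_one_iff s sub).mpr hinf h

theorem lt_of_prefix_drop (t' : List Char) (k : Nat)
    (h : ['\n', 'S', 'Q'] <+: t'.drop k) : k < t'.length := by
  by_contra hge
  rw [List.drop_eq_nil_of_le (by omega)] at h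
  obtain ⟨u, hu⟩ := h
  simp at hu

-- a list with no '\n' blocks any occurrence of a pattern that starts with '\n'
theorem no_nl_prefix (a r σ : List Char) (hna : '\n' ∉ a) (j : Nat) (hj : j < a.length) :
    ¬ ('\n' :: σ) <+: (a ++ r).drop j := by
  intro hpre
  rw [List.drop_append_of_le_length (le_of_lt hj)] at hpre
  rw [List.drop_eq_getElem_cons hj, List.cons_append] at hpre
  obtain ⟨heq, -⟩ := List.cons_prefix_cons.mp hpre
  exact hna (by rw [heq]; exact List.getElem_mem hj)

theorem no_nl_in (s σ : List Char) (h : '\n' ∉ s) (j : Nat) : ¬ ('\n' :: σ) <+: s.drop j := by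
  intro hpre
  obtain ⟨u, hu⟩ := hpre
  have hm : '\n' ∈ s.drop j := by rw [← hu]; simp
  exact h (List.drop_subset _ _ hm)

-- SQ is a prefix of a ++ '\n'::b iff it is a prefix of a
theorem sq_prefix_append (a b : List Char) :
    (['S', 'Q'] <+: a ++ '\n' :: b) ↔ (['S', 'Q'] <+: a) := by
  match a with
  | [] => simp [List.cons_prefix_cons]
  | [x] => simp [List.cons_prefix_cons]
  | x :: y :: r => simp [List.cons_prefix_cons]

-- the SQ-line test of A is the SQ-prefix test
theorem isSQ_iff (l : List Char) :
    (PySem.Chars.slice l none (some 2) = ['S', 'Q']) ↔ (['S', 'Q'] <+: l) := by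
  have h : PySem.Chars.slice l none (some 2) = l.take 2 := by
    simp [pysem]
  rw [h, List.prefix_iff_eq_take]
  exact ⟨fun h => h.symm, fun h => h.symm⟩

-- ===== Bcore on the three shapes of input =====

theorem Bcore_nonl (s : List Char) (hnl : '\n' ∉ s) : Bcore ('\n' :: s) = [] := by
  unfold Bcore
  by_cases hsq : ['S', 'Q'] <+: s
  · have hfind : PySem.Chars.find ('\n' :: s) ['\n', 'S', 'Q'] = ((0 : Nat) : Int) := by
      refine find_eq_of _ _ 0 ?_ (fun i hi => absurd hi (Nat.not_lt_zero i))
      simpa [List.cons_prefix_cons] using hsq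
    have hf2 : PySem.Chars.find (('\n' :: s).drop 1) ['\n'] = -1 := by
      refine find_eq_neg_one_of _ _ ?_
      exact no_nl_in s [] hnl
    rw [hfind]
    simp only [Nat.cast_zero]
    rw [if_neg (show ¬((0 : Int) = -1) by decide)]
    rw [show ((0 : Int) + 1) = ((1 : Nat) : Int) by norm_num]
    rw [PySem.Chars.findFrom_natCast _ _ 1 (by simp)]
    rw [hf2]
    simp
  · have hfind : PySem.Chars.find ('\n' :: s) ['\n', 'S', 'Q'] = -1 := by
      refine find_eq_neg_one_of _ _ ?_
      intro j
      match j with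
      | 0 =>
        simp only [List.drop_zero, List.cons_prefix_cons]
        rintro ⟨-, h⟩
        exact hsq h
      | j + 1 =>
        simpa using no_nl_in s ['S', 'Q'] hnl j
    rw [hfind]
    simp

theorem Bcore_found (a b : List Char) (hna : '\n' ∉ a) (hsq : ['S', 'Q'] <+: a) :
    Bcore ('\n' :: (a ++ '\n' :: b)) = b.filter PySem.Chars.isalpha := by
  unfold Bcore
  have hfind : PySem.Chars.find ('\n' :: (a ++ '\n' :: b)) ['\n', 'S', 'Q'] = ((0 : Nat) : Int) := by
    refine find_eq_of _ _ 0 ?_ (fun i hi => absurd hi (Nat.not_lt_zero i))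
    rw [List.drop_zero]
    exact List.cons_prefix_cons.mpr ⟨rfl, hsq.trans (List.prefix_append a _)⟩
  have hfind2 : PySem.Chars.find (a ++ '\n' :: b) ['\n'] = ((a.length : Nat) : Int) := by
    refine find_eq_of _ _ a.length ?_ ?_
    · rw [show a.length = a.length + 0 from rfl, drop_shift]
      simp [List.cons_prefix_cons]
    · intro i hi
      exact no_nl_prefix a ('\n' :: b) [] hna i hi
  have hdrop1 : ('\n' :: (a ++ '\n' :: b)).drop 1 = a ++ '\n' :: b := rfl
  rw [hfind]
  simp only [Nat.cast_zero]
  rw [if_neg (show ¬((0 : Int) = -1) by decide)]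
  rw [show ((0 : Int) + 1) = ((1 : Nat) : Int) by norm_num]
  rw [PySem.Chars.findFrom_natCast _ _ 1 (by simp)]
  rw [hdrop1, hfind2]
  rw [if_neg (show ¬(((a.length : Nat) : Int) = -1) by omega)]
  rw [if_neg (show ¬((((1 : Nat) : Nat) : Int) + ((a.length : Nat) : Int) = -1) by omega)]
  rw [show (((1 : Nat) : Int) + ((a.length : Nat) : Int) + 1) = ((a.length + 2 : Nat) : Int) by
    push_cast; ring]
  rw [slice_from_nat]
  have hd2 : ('\n' :: (a ++ '\n' :: b)).drop (a.length + 2) = b := by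
    have h := drop_shift ('\n' :: a) ('\n' :: b) 1
    simp only [List.length_cons] at h
    rw [show a.length + 2 = a.length + 1 + 1 from rfl]
    simpa using h
  rw [hd2]

theorem Bcore_shift (a b : List Char) (hna : '\n' ∉ a) (hsq : ¬ ['S', 'Q'] <+: a) :
    Bcore ('\n' :: (a ++ '\n' :: b)) = Bcore ('\n' :: b) := by
  have hshift : ∀ m : Nat,
      ('\n' :: (a ++ '\n' :: b)).drop (a.length + 1 + m) = ('\n' :: b).drop m := by
    intro m
    have h := drop_shift ('\n' :: a) ('\n' :: b) m
    simpa [List.length_cons, Nat.succ_add, Nat.add_assoc, Nat.add_comm, Nat.add_left_comm] using h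
  have hno_low : ∀ j, j < a.length + 1 → ¬ ['\n', 'S', 'Q'] <+: ('\n' :: (a ++ '\n' :: b)).drop j := by
    intro j hj
    match j with
    | 0 =>
      simp only [List.drop_zero, List.cons_prefix_cons]
      rintro ⟨-, h⟩
      exact hsq ((sq_prefix_append a b).mp h)
    | j + 1 =>
      simpa using no_nl_prefix a ('\n' :: b) ['S', 'Q'] hna j (by omega)
  unfold Bcore
  by_cases hf : PySem.Chars.find ('\n' :: b) ['\n', 'S', 'Q'] = -1
  · have hfa : PySem.Chars.find ('\n' :: (a ++ '\n' :: b)) ['\n', 'S', 'Q'] = -1 := by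
      refine find_eq_neg_one_of _ _ ?_
      intro j
      rcases Nat.lt_or_ge j (a.length + 1) with hj | hj
      · exact hno_low j hj
      · obtain ⟨m, rfl⟩ : ∃ m, j = a.length + 1 + m := ⟨j - (a.length + 1), by omega⟩
        rw [hshift m]
        exact not_prefix_drop_of_find_neg _ _ hf m
    rw [hfa, hf]
    simp
  · have h0 : 0 ≤ PySem.Chars.find ('\n' :: b) ['\n', 'S', 'Q'] := by
      have := PySem.Chars.neg_one_le_find ('\n' :: b) ['\n', 'S', 'Q']
      omega
    obtain ⟨hppre, hpmin⟩ := PySem.Chars.find_spec h0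
    set p := (PySem.Chars.find ('\n' :: b) ['\n', 'S', 'Q']).toNat with hp
    have hplt : p < ('\n' :: b).length := lt_of_prefix_drop _ _ hppre
    have hfb : PySem.Chars.find ('\n' :: b) ['\n', 'S', 'Q'] = ((p : Nat) : Int) := by omega
    have hfa : PySem.Chars.find ('\n' :: (a ++ '\n' :: b)) ['\n', 'S', 'Q']
        = ((a.length + 1 + p : Nat) : Int) := by
      refine find_eq_of _ _ (a.length + 1 + p) ?_ ?_
      · rw [hshift p]
        exact hppre
      · intro i hi
        rcases Nat.lt_or_ge i (a.length + 1) with h' | h'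
        · exact hno_low i h'
        · obtain ⟨m, rfl⟩ : ∃ m, i = a.length + 1 + m := ⟨i - (a.length + 1), by omega⟩
          rw [hshift m]
          exact hpmin m (by omega)
    rw [hfa, hfb]
    rw [if_neg (show ¬(((a.length + 1 + p : Nat) : Int) = -1) by omega)]
    rw [if_neg (show ¬(((p : Nat) : Int) = -1) by omega)]
    rw [show (((a.length + 1 + p : Nat) : Int) + 1) = ((a.length + 1 + p + 1 : Nat) : Int) by
      push_cast; ring]
    rw [show (((p : Nat) : Int) + 1) = ((p + 1 : Nat) : Int) by push_cast; ring]
    rw [PySem.Chars.findFrom_natCast _ _ (a.length + 1 + p + 1)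
      (by simp only [List.length_cons, List.length_append] at hplt ⊢; omega)]
    rw [PySem.Chars.findFrom_natCast _ _ (p + 1)
      (by simp only [List.length_cons] at hplt ⊢; omega)]
    have hdd : ('\n' :: (a ++ '\n' :: b)).drop (a.length + 1 + p + 1) = ('\n' :: b).drop (p + 1) := by
      have h := hshift (p + 1)
      rwa [← Nat.add_assoc] at h
    rw [hdd]
    by_cases hr : PySem.Chars.find (('\n' :: b).drop (p + 1)) ['\n'] = -1
    · rw [hr]
      simp
    · have hr0 : 0 ≤ PySem.Chars.find (('\n' :: b).drop (p + 1)) ['\n'] := by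
        have := PySem.Chars.neg_one_le_find (('\n' :: b).drop (p + 1)) ['\n']
        omega
      set r := PySem.Chars.find (('\n' :: b).drop (p + 1)) ['\n'] with hrdef
      rw [if_neg hr, if_neg hr]
      rw [if_neg (show ¬(((a.length + 1 + p + 1 : Nat) : Int) + r = -1) by omega)]
      rw [if_neg (show ¬(((p + 1 : Nat) : Int) + r = -1) by omega)]
      rw [show (((a.length + 1 + p + 1 : Nat) : Int) + r + 1)
          = ((a.length + 1 + p + 1 + r.toNat + 1 : Nat) : Int) by push_cast; omega]
      rw [show (((p + 1 : Nat) : Int) + r + 1) = ((p + 1 + r.toNat + 1 : Nat) : Int) by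
        push_cast; omega]
      rw [slice_from_nat, slice_from_nat]
      have hd3 : ('\n' :: (a ++ '\n' :: b)).drop (a.length + 1 + p + 1 + r.toNat + 1)
          = ('\n' :: b).drop (p + 1 + r.toNat + 1) := by
        have h := hshift (p + 1 + r.toNat + 1)
        rwa [← Nat.add_assoc, ← Nat.add_assoc] at h
      rw [hd3]

-- ===== Acore on the three shapes of input =====

theorem Acore_nonl (s : List Char) (hnl : '\n' ∉ s) : Acore s = [] := by
  unfold Acore
  rw [mySplit_no_nl s hnl]
  rw [List.findIdx?_cons, List.findIdx?_nil]
  split_ifs with h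
  · simp [PySem.Chars.join, List.intercalate]
  · simp

theorem Acore_found (a b : List Char) (hna : '\n' ∉ a) (hsq : ['S', 'Q'] <+: a) :
    Acore (a ++ '\n' :: b) = b.filter PySem.Chars.isalpha := by
  unfold Acore
  rw [mySplit_append a b hna]
  rw [List.findIdx?_cons,
    if_pos (by simp only [decide_eq_true_eq, isSQ_iff]; exact hsq)]
  simp only [List.drop_succ_cons, List.drop_zero, join_mySplit]

theorem Acore_shift (a b : List Char) (hna : '\n' ∉ a) (hsq : ¬ ['S', 'Q'] <+: a) :
    Acore (a ++ '\n' :: b) = Acore b := by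
  unfold Acore
  rw [mySplit_append a b hna]
  rw [List.findIdx?_cons,
    if_neg (by simp only [decide_eq_true_eq, isSQ_iff]; exact hsq)]
  cases hf : (mySplit b).findIdx?
      (fun line => decide (PySem.Chars.slice line none (some 2) = ['S', 'Q'])) with
  | none => simp [hf]
  | some j => simp [hf]

theorem main_lemma : ∀ (n : Nat) (s : List Char), s.length = n → Bcore ('\n' :: s) = Acore s := by
  intro n
  induction n using Nat.strong_induction_on with
  | _ n ih =>
    intro s hs
    by_cases hnl : '\n' ∈ s
    · have key : ∀ (a bb : List Char), '\n' ∉ a → s = a ++ '\n' :: bb →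
          Bcore ('\n' :: s) = Acore s := by
        intro a bb hna hdec
        have hblt : bb.length < n := by
          have h := congrArg List.length hdec
          simp [List.length_append] at h
          omega
        rw [hdec]
        by_cases hsq : ['S', 'Q'] <+: a
        · rw [Bcore_found a bb hna hsq, Acore_found a bb hna hsq]
        · rw [Bcore_shift a bb hna hsq, Acore_shift a bb hna hsq]
          exact ih bb.length hblt bb rfl
      have hd : s.dropWhile (fun c => c != '\n') ≠ [] := by
        intro h
        have heq : s = s.takeWhile (fun c => c != '\n') := by
          conv_lhs => rw [← List.takeWhile_append_dropWhile (p := fun c => c != '\n') (l := s)]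
          rw [h, List.append_nil]
        rw [heq] at hnl
        have h2 := List.mem_takeWhile_imp hnl
        simp at h2
      obtain ⟨c, cs, hcs⟩ := List.exists_cons_of_ne_nil hd
      have hc : c = '\n' := by
        have h2 := List.head_dropWhile_not (fun c => c != '\n') hd
        simp only [hcs, List.head_cons] at h2
        simpa using h2
      refine key (s.takeWhile (fun c => c != '\n')) cs ?_ ?_
      · intro hm
        have h2 := List.mem_takeWhile_imp hm
        simp at h2
      · conv_lhs => rw [← List.takeWhile_append_dropWhile (p := fun c => c != '\n') (l := s)]
        rw [hcs, hc]
    · rw [Bcore_nonl s hnl, Acore_nonl s hnl]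

-- ===== VERDICT =====
theorem read_seq_spec : Claim_equal_read_seq := by
  intro buf _
  unfold Spec_read_seq
  rw [read_seq_eq, read_seq_alt_eq, main_lemma buf.toList.length buf.toList rfl]
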